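-- pv_equiv track=rewrite | github.com/naxrevlis/advent-of-code-2021 | day 3/calculate_power_consuption.py | get_binary_rates
-- ===== SOURCE A (Python) =====
-- def invert_binary_number(binary_number: str) -> str:
--     """Invert a binary number."""
--     inverted_binary = ""
--     for i in range(len(binary_number)):
--         inverted_binary += str(1 - int(binary_number[i]))
--     return inverted_binary
--
-- def get_binary_rates(metric_values: list) -> (str, str):
--     """Get the binary representation of the power consumption rates from data."""
--     count_dict = dict(zip([x for x in range(len(metric_values[0]))], [0 for x in range(len(metric_values[0]))]))
--     metric_values_len = len(metric_values)
--     epsilon_rate_binary = ""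
--     for item in metric_values:
--         for i in range(len(item)):
--             if item[i] == "1":
--                 count_dict[i] += 1
--     for key, value in count_dict.items():
--         if count_dict[key] >= metric_values_len / 2:
--             epsilon_rate_binary += "1"
--         else:
--             epsilon_rate_binary += "0"
--     return epsilon_rate_binary, invert_binary_number(epsilon_rate_binary)
-- ===== SOURCE B (Python) =====
-- def get_binary_rates(metric_values: list) -> (str, str):
--     """Get the binary representation of the power consumption rates from data."""
--     width = len(metric_values[0])
--     n = len(metric_values)
--     epsilon_rate_binary = "".join(
--         "1" if 2 * sum(1 for row in metric_values if i < len(row) and row[i] == "1") >= n else "0"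
--         for i in range(width)
--     )
--     gamma_rate_binary = "".join("0" if c == "1" else "1" for c in epsilon_rate_binary)
--     return epsilon_rate_binary, gamma_rate_binary
-- ===== Notes on version B (the rewrite author's own statement) =====
-- stated objective: idiomatic
-- what changed: Replaces the row-major pass that accumulates per-column counts in a dict (plus a second dict pass and a separate string-inverting helper) by a direct column-major comprehension: for each column index count the '1's in that column and emit the bit, deriving gamma by flipping epsilon's characters.
import Mathlib
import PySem

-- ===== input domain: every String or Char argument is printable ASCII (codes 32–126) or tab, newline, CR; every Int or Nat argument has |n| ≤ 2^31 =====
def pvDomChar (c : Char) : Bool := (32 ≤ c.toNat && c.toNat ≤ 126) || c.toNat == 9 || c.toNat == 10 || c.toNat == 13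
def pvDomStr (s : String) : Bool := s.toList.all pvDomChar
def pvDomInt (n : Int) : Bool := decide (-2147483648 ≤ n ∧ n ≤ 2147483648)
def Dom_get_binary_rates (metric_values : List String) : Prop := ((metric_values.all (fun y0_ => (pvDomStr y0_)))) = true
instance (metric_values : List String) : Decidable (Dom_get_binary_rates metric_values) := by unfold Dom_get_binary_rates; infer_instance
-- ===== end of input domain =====

-- B replaces A's row-major dict-accumulating pass (plus a separate inverting helper) by a
-- direct column-major count per column; same cost, more idiomatic.


-- ===== PORT A =====
-- invert_binary_number: builds the string char by char as str(1 - int(s[i]))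
def invert_binary_number (binary_number : String) : String :=
  let cs := binary_number.toList
  String.ofList ((PySem.List.pyRange 0 (PySem.List.len cs)).foldl
    (fun acc i =>
      acc ++ PySem.Int.toChars (1 - ((PySem.Int.ofChars? [PySem.List.pyGetD cs i ' ']).getD 0)))
    [])

def get_binary_rates (metric_values : List String) : String × String :=
  -- metric_values[0] raises IndexError on []; Pre_ excludes the empty list, headD is the total stand-in
  let width : Int := PySem.Str.len (metric_values.headD "")
  let count_dict : PySem.Dict Int Int :=
    PySem.Dict.ofList ((PySem.List.pyRange 0 width).zip
      ((PySem.List.pyRange 0 width).map (fun _ => (0 : Int))))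
  let metric_values_len : Int := (metric_values.length : Int)
  -- count_dict[i] += 1 raises KeyError when i is not a key; Pre_ excludes those inputs, so
  -- Dict.modify (which would insert) coincides with Python's += there
  let d := metric_values.foldl
    (fun d item =>
      (PySem.List.pyRange 0 (PySem.Str.len item)).foldl
        (fun d i =>
          if PySem.List.pyGetD item.toList i ' ' = '1' then d.modify i 0 (· + 1) else d)
        d)
    count_dict
  -- count_dict[key] >= metric_values_len / 2 : for integers v >= n/2 (float) is exactly 2*v >= n
  let epsilon_rate_binary := String.ofList (d.items.foldl
    (fun acc kv =>
      if 2 * d.getD kv.1 0 ≥ metric_values_len then acc ++ ['1'] else acc ++ ['0'])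
    [])
  (epsilon_rate_binary, invert_binary_number epsilon_rate_binary)

-- ===== PORT B =====
def get_binary_rates_alt (metric_values : List String) : String × String :=
  let rows := metric_values.map String.toList
  let width := (rows.headD []).length
  let n : Int := (metric_values.length : Int)
  let epsilon := (List.range width).map (fun i =>
    if 2 * ((rows.countP (fun r => r.getD i ' ' = '1') : Nat) : Int) ≥ n then '1' else '0')
  (String.ofList epsilon, String.ofList (epsilon.map (fun c => if c == '1' then '0' else '1')))

-- ===== PRECONDITION & SPEC =====
-- Pre_ excludes exactly the inputs where A raises: the empty list (IndexError on metric_values[0])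
-- and lists where some row has a '1' at an index ≥ len(metric_values[0]) (KeyError on count_dict[i]).
def Pre_get_binary_rates (metric_values : List String) : Prop :=
  metric_values ≠ [] ∧
  ∀ s ∈ metric_values, '1' ∉ s.toList.drop (metric_values.headD "").toList.length
instance (metric_values : List String) : Decidable (Pre_get_binary_rates metric_values) := by
  unfold Pre_get_binary_rates; infer_instance
def pvWitness_get_binary_rates : List String := ["10", "01", "11"]

def Spec_get_binary_rates (metric_values : List String) (out : String × String) : Prop :=
  out = get_binary_rates_alt metric_values
instance (metric_values : List String) (out : String × String) : Decidable (Spec_get_binary_rates metric_values out) := by unfold Spec_get_binary_rates; infer_instance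

-- ===== CLAIM (what is proved, stated in full; the proofs are below) =====
def Claim_equal_get_binary_rates : Prop := ∀ (metric_values : List String), Dom_get_binary_rates metric_values → Pre_get_binary_rates metric_values → Spec_get_binary_rates metric_values (get_binary_rates metric_values)
-- ===== LEMMAS AND PROOFS =====

-- getD through one row's inner modify-loop, as a filter length
theorem pv_foldl_modify_getD (L : List Int) (cond : Int → Prop) [DecidablePred cond] (d : PySem.Dict Int Int) (i : Int) :
    (L.foldl (fun d j => if cond j then d.modify j 0 (· + 1) else d) d).getD i 0
      = d.getD i 0 + ((L.filter (fun j => cond j ∧ j = i)).length : Int) := by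
  induction L generalizing d with
  | nil => simp
  | cons j L ih =>
    simp only [List.foldl_cons, List.filter_cons]
    by_cases hc : cond j
    · by_cases hji : j = i
      · subst hji
        rw [ih]
        simp [hc]
        ring
      · rw [ih]
        rw [if_pos hc, PySem.Dict.getD_modify]
        simp [hc, hji, Ne.symm hji]
    · rw [ih]; simp [hc]

-- the keys survive one row's inner modify-loop when every modified key is present
theorem pv_foldl_modify_keys (L : List Int) (cond : Int → Prop) [DecidablePred cond] (d : PySem.Dict Int Int)
    (h : ∀ j ∈ L, cond j → d.contains j = true) :
    (L.foldl (fun d j => if cond j then d.modify j 0 (· + 1) else d) d).keys = d.keys := by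
  induction L generalizing d with
  | nil => rfl
  | cons j L ih =>
    simp only [List.foldl_cons]
    by_cases hc : cond j
    · have hcj := h j (by simp) hc
      have hk : (d.modify j 0 (· + 1)).keys = d.keys := by
        rw [PySem.Dict.keys_modify, PySem.Dict.keys_insert_of_contains _ _ hcj]
      rw [if_pos hc, ih, hk]
      intro x hx hcx
      rw [PySem.Dict.contains_iff_mem_keys] at hcj ⊢
      rw [hk, ← PySem.Dict.contains_iff_mem_keys]
      exact h x (by simp [hx]) hcx
    · rw [if_neg hc]
      exact ih d (fun x hx => h x (by simp [hx]))

-- the initial dict: items of ofList over distinct keys paired with 0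
theorem pv_items_ofList (L : List Int) (hnd : L.Nodup) :
    (PySem.Dict.ofList (L.map (fun i => (i, (0 : Int))))).items = L.map (fun i => (i, (0 : Int))) := by
  have := PySem.Dict.items_foldl_insert_fresh (L.map (fun i => (i, (0 : Int))))
    Prod.fst Prod.snd PySem.Dict.empty (by simp [PySem.Dict.contains_empty]) (by simpa [List.map_map, Function.comp_def] using hnd)
  simpa [PySem.Dict.ofList, PySem.Dict.update] using this

-- in-range filter of one row's loop range, counted at a fixed column
theorem pv_countP_range (n : Nat) (i : Nat) (c : Nat → Prop) [DecidablePred c] :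
    (List.range n).countP (fun k => decide (c k ∧ k = i)) = if i < n ∧ c i then 1 else 0 := by
  by_cases hci : c i
  · have h1 : (List.range n).countP (fun k => decide (c k ∧ k = i)) = List.count i (List.range n) := by
      rw [List.count]
      apply List.countP_congr
      intro k _
      simp only [decide_eq_true_eq, beq_iff_eq]
      constructor
      · exact And.right
      · intro h; subst h; exact ⟨hci, rfl⟩
    rw [h1, List.count_range]
    by_cases hin : i < n <;> simp [hin, hci]
  · have h0 : (List.range n).countP (fun k => decide (c k ∧ k = i)) = 0 :=
      List.countP_eq_zero.mpr (fun k _ => by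
        simp only [decide_eq_true_eq]
        rintro ⟨h, rfl⟩
        exact hci h)
    rw [h0]
    simp [hci]

theorem pv_row_filter (s : String) (i : Nat) :
    (((PySem.List.pyRange 0 (PySem.Str.len s)).filter
        (fun j => (PySem.List.pyGetD s.toList j ' ' = '1') ∧ j = (i : Int))).length : Int)
      = if s.toList.getD i ' ' = '1' then 1 else 0 := by
  rw [PySem.Str.len_eq, PySem.List.pyRange_zero_nat, List.filter_map, List.length_map,
    ← List.countP_eq_length_filter]
  have h1 : List.countP
      ((fun j : Int => decide ((PySem.List.pyGetD s.toList j ' ' = '1') ∧ j = (i : Int))) ∘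
        (fun k : Nat => (k : Int)))
      (List.range s.toList.length)
      = List.countP (fun k : Nat => decide ((s.toList.getD k ' ' = '1') ∧ k = i))
          (List.range s.toList.length) := by
    apply List.countP_congr
    intro k _
    simp [Function.comp, PySem.List.pyGetD_natCast]
  rw [h1, pv_countP_range s.toList.length i (fun k => s.toList.getD k ' ' = '1')]
  by_cases hc : s.toList.getD i ' ' = '1'
  · have hlt : i < s.toList.length := by
      by_contra hge
      rw [List.getD_eq_default _ _ (by omega)] at hc
      exact absurd hc (by decide)
    rw [if_pos ⟨hlt, hc⟩, if_pos hc]; norm_num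
  · rw [if_neg (fun h => hc h.2), if_neg hc]; norm_num

-- A's whole double loop, read off at a column index
theorem pv_big_getD (mv : List String) (d : PySem.Dict Int Int) (i : Nat) :
    (mv.foldl
      (fun d item =>
        (PySem.List.pyRange 0 (PySem.Str.len item)).foldl
          (fun d j =>
            if PySem.List.pyGetD item.toList j ' ' = '1' then d.modify j 0 (· + 1) else d)
          d)
      d).getD (i : Int) 0
    = d.getD (i : Int) 0 + (mv.countP (fun s => s.toList.getD i ' ' = '1') : Int) := by
  induction mv generalizing d with
  | nil => simp
  | cons s mv ih =>
    rw [List.foldl_cons, ih, pv_foldl_modify_getD _ (fun j => PySem.List.pyGetD s.toList j ' ' = '1'),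
      List.countP_cons]
    have := pv_row_filter s i
    simp only [decide_eq_true_eq] at this ⊢
    rw [this]
    simp
    ring

-- A's whole double loop keeps the keys 0..w-1, given no '1' beyond column w
theorem pv_big_keys (mv : List String) (w : Nat) (d : PySem.Dict Int Int)
    (hd : d.keys = PySem.List.pyRange 0 (w : Int))
    (hpre : ∀ s ∈ mv, '1' ∉ s.toList.drop w) :
    (mv.foldl
      (fun d item =>
        (PySem.List.pyRange 0 (PySem.Str.len item)).foldl
          (fun d j =>
            if PySem.List.pyGetD item.toList j ' ' = '1' then d.modify j 0 (· + 1) else d)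
          d)
      d).keys = PySem.List.pyRange 0 (w : Int) := by
  induction mv generalizing d with
  | nil => exact hd
  | cons s mv ih =>
    rw [List.foldl_cons]
    apply ih
    · rw [pv_foldl_modify_keys _ (fun j => PySem.List.pyGetD s.toList j ' ' = '1') d]
      · exact hd
      · intro j hj hcj
        rw [PySem.Str.len_eq, PySem.List.mem_pyRange_one] at hj
        obtain ⟨hj0, hjlen⟩ := hj
        have hjn : j = ((j.toNat : Nat) : Int) := (Int.toNat_of_nonneg hj0).symm
        have hjlt : j.toNat < s.toList.length := by omega
        have hget : s.toList.getD j.toNat ' ' = '1' := by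
          rw [hjn, PySem.List.pyGetD_natCast] at hcj
          simpa using hcj
        have hjw : j.toNat < w := by
          by_contra hge
          exact hpre s (by simp) (by
            refine List.mem_iff_getElem.mpr ⟨j.toNat - w, by rw [List.length_drop]; omega, ?_⟩
            rw [List.getElem_drop]
            have : s.toList[w + (j.toNat - w)] = s.toList.getD j.toNat ' ' := by
              rw [List.getD_eq_getElem _ _ (by omega)]
              congr 1; omega
            rw [this, hget])
        rw [PySem.Dict.contains_iff_mem_keys, hd, PySem.List.mem_pyRange_one]
        omega
    · intro t ht; exact hpre t (by simp [ht])

-- the initial dict reads 0 at every key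
theorem pv_getD0 (w : Nat) (i : Int) :
    (PySem.Dict.ofList ((PySem.List.pyRange 0 (w : Int)).zip
      ((PySem.List.pyRange 0 (w : Int)).map (fun _ => (0 : Int))))).getD i 0 = 0 := by
  have hz : (PySem.List.pyRange 0 (w : Int)).zip ((PySem.List.pyRange 0 (w : Int)).map (fun _ => (0 : Int)))
      = (PySem.List.pyRange 0 (w : Int)).map (fun i => (i, (0 : Int))) := by
    simpa using List.zip_map' (f := id) (g := fun _ : Int => (0 : Int)) (l := PySem.List.pyRange 0 (w : Int))
  rw [hz]
  have hitems := pv_items_ofList _ (PySem.List.nodup_pyRange_one 0 (w : Int))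
  set d0 := PySem.Dict.ofList ((PySem.List.pyRange 0 (w : Int)).map (fun i => (i, (0 : Int))))
  have hkeys : d0.keys = PySem.List.pyRange 0 (w : Int) := by
    show d0.items.map Prod.fst = _
    rw [hitems]; simp [Function.comp_def]
  by_cases hc : d0.contains i
  · have hmem : i ∈ d0.keys := (PySem.Dict.contains_iff_mem_keys _ _).mp hc
    rw [hkeys] at hmem
    exact PySem.Dict.getD_of_mem_items d0 (by rw [hitems]; exact List.mem_map_of_mem hmem)
      (by rw [hkeys]; exact PySem.List.nodup_pyRange_one 0 (w : Int)) 0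
  · exact PySem.Dict.getD_of_not_contains d0 0 (by simpa using hc)

-- A's epsilon fold emits one char per dict item
theorem pv_foldl_bits {α : Type} (p : α → Prop) [DecidablePred p] (L : List α) (a : List Char) :
    L.foldl (fun acc x => if p x then acc ++ ['1'] else acc ++ ['0']) a
      = a ++ L.map (fun x => if p x then '1' else '0') := by
  induction L generalizing a with
  | nil => simp
  | cons x L ih => by_cases hx : p x <;> simp [hx, ih]

-- invert_binary_number on a 0/1 string flips each character
theorem pv_flatMap_bits (l : List Char) (h : ∀ c ∈ l, c = '0' ∨ c = '1') :
    l.flatMap (fun c => PySem.Int.toChars (1 - ((PySem.Int.ofChars? [c]).getD 0)))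
      = l.map (fun c => if c == '1' then '0' else '1') := by
  induction l with
  | nil => rfl
  | cons c l ih =>
    rw [List.flatMap_cons, List.map_cons, ih (fun x hx => h x (by simp [hx]))]
    rcases h c (by simp) with hc | hc <;> subst hc <;> rfl

theorem get_binary_rates_spec : Claim_equal_get_binary_rates := by
  intro mv hdom hpre
  obtain ⟨hne, hp⟩ := hpre
  unfold Spec_get_binary_rates get_binary_rates get_binary_rates_alt invert_binary_number
  simp only []
  set w : Nat := (mv.headD "").toList.length with hwdef
  have hlen : PySem.Str.len (mv.headD "") = (w : Int) := PySem.Str.len_eq _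
  have hrows : (mv.map String.toList).headD [] = (mv.headD "").toList := by
    cases mv with
    | nil => exact absurd rfl hne
    | cons s t => rfl
  rw [hlen, hrows]
  set n : Int := (mv.length : Int)
  set D := mv.foldl
      (fun d item =>
        (PySem.List.pyRange 0 (PySem.Str.len item)).foldl
          (fun d j =>
            if PySem.List.pyGetD item.toList j ' ' = '1' then d.modify j 0 (· + 1) else d)
          d)
      (PySem.Dict.ofList ((PySem.List.pyRange 0 (w : Int)).zip
        ((PySem.List.pyRange 0 (w : Int)).map (fun _ => (0 : Int))))) with hD
  have hkeys : D.keys = PySem.List.pyRange 0 (w : Int) := by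
    rw [hD]
    apply pv_big_keys mv w _ _ hp
    have hitems := pv_items_ofList _ (PySem.List.nodup_pyRange_one 0 (w : Int))
    have hz : (PySem.List.pyRange 0 (w : Int)).zip ((PySem.List.pyRange 0 (w : Int)).map (fun _ => (0 : Int)))
        = (PySem.List.pyRange 0 (w : Int)).map (fun i => (i, (0 : Int))) := by
      simpa using List.zip_map' (f := id) (g := fun _ : Int => (0 : Int)) (l := PySem.List.pyRange 0 (w : Int))
    rw [hz]
    show (PySem.Dict.ofList _).items.map Prod.fst = _
    rw [hitems]; simp [Function.comp_def]
  have hgetD : ∀ i : Nat, D.getD (i : Int) 0 = (mv.countP (fun s => s.toList.getD i ' ' = '1') : Int) := by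
    intro i
    rw [hD, pv_big_getD, pv_getD0]
    ring
  have hitemsD : D.items = (PySem.List.pyRange 0 (w : Int)).map (fun k => (k, D.getD k 0)) := by
    rw [PySem.Dict.items_eq_map_keys D (by rw [hkeys]; exact PySem.List.nodup_pyRange_one 0 (w : Int)) 0,
      hkeys]
  -- the epsilon character lists agree
  have heps : D.items.foldl
      (fun acc kv => if 2 * D.getD kv.1 0 ≥ n then acc ++ ['1'] else acc ++ ['0']) []
      = (List.range w).map (fun i =>
          if 2 * (((mv.map String.toList).countP (fun r => decide (r.getD i ' ' = '1')) : Nat) : Int) ≥ n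
          then '1' else '0') := by
    rw [pv_foldl_bits (fun kv => 2 * D.getD kv.1 0 ≥ n) D.items [], hitemsD,
      List.map_map, PySem.List.pyRange_zero_nat, List.map_map]
    simp only [List.nil_append]
    apply List.map_congr_left
    intro i _
    simp only [Function.comp]
    rw [hgetD i, List.countP_map]
    simp [Function.comp_def]
  have hbits : ∀ c ∈ (List.range w).map (fun i =>
      if 2 * (((mv.map String.toList).countP (fun r => decide (r.getD i ' ' = '1')) : Nat) : Int) ≥ n
      then '1' else '0'), c = '0' ∨ c = '1' := by
    intro c hc
    obtain ⟨i, _, hi⟩ := List.mem_map.mp hc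
    by_cases h2 : 2 * (((mv.map String.toList).countP (fun r => decide (r.getD i ' ' = '1')) : Nat) : Int) ≥ n
    · right; rw [← hi, if_pos h2]
    · left; rw [← hi, if_neg h2]
  rw [heps]
  refine Prod.ext rfl ?_
  simp only [String.toList_ofList]
  rw [PySem.List.foldl_pyRange_zero_pyGetD _ ' '
    (fun acc c => acc ++ PySem.Int.toChars (1 - ((PySem.Int.ofChars? [c]).getD 0))) [],
    PySem.List.foldl_append_eq_flatMap, List.nil_append, pv_flatMap_bits _ hbits]
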